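-- pv_equiv track=rewrite | github.com/timrprobocom/advent-of-code | 2015/day08.py | unescape
-- ===== SOURCE A (Python) =====
-- def unescape(s):
--     sz = 2
--     esc = False
--     for c in s:
--         if esc:
--             if c == 'x':
--                 sz += 3
--             else:
--                 sz += 1
--             esc = False
--         elif c == '\\':
--             esc = True
--     return sz
-- ===== SOURCE B (Python) =====
-- def unescape(s):
--     parts = s.split('\\')
--     # parts[1:] are the pieces that followed each backslash; scan them grouping
--     # maximal backslash runs: an empty piece between two backslashes extends the
--     # current run, any other piece closes it.  A closed run of k backslashes
--     # costs k//2 (escaped pairs) plus, if k is odd and a character follows,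
--     # 3 for a \x.. escape else 1.
--     total = 2
--     k = 1
--     for i in range(1, len(parts)):
--         p = parts[i]
--         if p == '' and i + 1 < len(parts):
--             k += 1
--         else:
--             if k % 2 == 1 and p:
--                 total += 3 if p[0] == 'x' else 1
--             total += k // 2
--             k = 1
--     return total
-- ===== Notes on version B (the rewrite author's own statement) =====
-- stated objective: faster
-- what changed: Replaces the per-character esc-flag state machine with a staged computation: split the string on backslashes once, then count each maximal backslash run arithmetically (k//2 escaped pairs plus, if k is odd, the escaped following character), so the per-character work moves into str.split and the Python loop runs only once per backslash run.
import Mathlib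
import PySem

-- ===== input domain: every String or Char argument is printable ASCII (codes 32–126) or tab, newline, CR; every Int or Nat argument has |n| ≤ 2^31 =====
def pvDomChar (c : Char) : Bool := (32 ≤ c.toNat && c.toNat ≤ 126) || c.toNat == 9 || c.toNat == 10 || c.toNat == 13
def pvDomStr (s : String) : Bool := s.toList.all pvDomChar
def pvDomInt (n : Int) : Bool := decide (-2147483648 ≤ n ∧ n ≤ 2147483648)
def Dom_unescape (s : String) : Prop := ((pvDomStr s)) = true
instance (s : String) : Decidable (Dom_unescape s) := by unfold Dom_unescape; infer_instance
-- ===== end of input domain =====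

-- B replaces A's per-character esc-flag state machine by a staged computation: split the string on '\' once,
-- then count each maximal backslash run arithmetically (k//2 pairs, plus the escaped char if k is odd); the timing
-- run measured B faster (per-character work moves into str.split; the loop runs once per run, not per char).


-- ===== PORT A =====
-- A: fold over the characters carrying (sz, esc) exactly as the Python loop does.
def unescapeStep (st : Int × Bool) (c : Char) : Int × Bool :=
  if st.2 then
    (st.1 + (if c = 'x' then 3 else 1), false)
  else if c = '\\' then
    (st.1, true)
  else
    st

def unescape (s : String) : Int :=
  (s.toList.foldl unescapeStep (2, false)).1

-- ===== PORT B =====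
-- B's for-loop over parts[1:] as recursion over that list carrying (k, total);
-- Python's lookahead `i + 1 < len(parts)` is `rest ≠ []`.
def runsGo : List String → Int → Int → Int
  | [], _, total => total
  | p :: rest, k, total =>
    if p = "" ∧ rest ≠ [] then
      -- empty piece between two backslashes: the run continues
      runsGo rest (k + 1) total
    else
      -- run ends: the escaped char (3 for \x.., else 1) if k is odd and a char follows, plus k//2 pairs
      runsGo rest 1 (total +
        (if PySem.Int.mod k 2 = 1 ∧ p ≠ "" then
          (if PySem.Str.pyGet? p 0 = some 'x' then 3 else 1) else 0) +
        PySem.Int.floordiv k 2)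

def unescape_alt (s : String) : Int :=
  -- s.split('\\'): the separator "\\" is nonempty, so split? is always `some`; the getD default never fires
  runsGo (((PySem.Str.split? s "\\").getD []).drop 1) 1 2

-- ===== PRECONDITION & SPEC =====
def Spec_unescape (s : String) (out : Int) : Prop := out = unescape_alt s
instance (s : String) (out : Int) : Decidable (Spec_unescape s out) := by unfold Spec_unescape; infer_instance

-- ===== CLAIM (what is proved, stated in full; the proofs are below) =====
def Claim_equal_unescape : Prop := ∀ (s : String), Dom_unescape s → Spec_unescape s (unescape s)

-- ===== LEMMAS AND PROOFS =====

-- Reference: A's remaining count from esc = false (goChar) and from esc = true (goEsc).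
def goChar : List Char → Int
  | [] => 0
  | c :: rest =>
    if c = '\\' then
      match rest with
      | [] => 0
      | d :: tl => (if d = 'x' then 3 else 1) + goChar tl
    else goChar rest

def goEsc : List Char → Int
  | [] => 0
  | d :: tl => (if d = 'x' then 3 else 1) + goChar tl

theorem goChar_backslash (rest : List Char) : goChar ('\\' :: rest) = goEsc rest := by
  cases rest <;> simp [goChar, goEsc]

-- Invariant of A's fold, both flag states at once.
theorem unescape_fold_inv (l : List Char) :
    (∀ sz : Int, (l.foldl unescapeStep (sz, false)).1 = sz + goChar l) ∧
    (∀ sz : Int, (l.foldl unescapeStep (sz, true)).1 = sz + goEsc l) := by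
  induction l with
  | nil => simp [goChar, goEsc]
  | cons c rest ih =>
    constructor
    · intro sz
      by_cases hc : c = '\\'
      · subst hc
        simp only [List.foldl_cons, unescapeStep, Bool.false_eq_true, if_false, ite_true]
        rw [ih.2 sz, goChar_backslash]
      · simp only [List.foldl_cons, unescapeStep, Bool.false_eq_true, if_false, if_neg hc]
        rw [ih.1 sz]
        conv_rhs => rw [goChar.eq_def]
        simp [hc]
    · intro sz
      simp only [List.foldl_cons, unescapeStep, ite_true, goEsc]
      rw [ih.1]
      ring

-- Structural characterisation of splitting on '\': head piece and tail pieces.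
def splitRec : List Char → List Char × List (List Char)
  | [] => ([], [])
  | c :: l =>
    let (h, t) := splitRec l
    if c = '\\' then ([], h :: t) else (c :: h, t)

theorem splitOn_go_spec (l : List Char) : ∀ (fuel : Nat) (cur : List Char) (acc : List (List Char)),
    l.length < fuel →
    PySem.Chars.splitOn.go ['\\'] fuel l cur acc =
      acc.reverse ++ (cur.reverse ++ (splitRec l).1) :: (splitRec l).2 := by
  induction l with
  | nil =>
    intro fuel cur acc hf
    match fuel, hf with
    | fuel + 1, _ =>
      rw [PySem.Chars.splitOn.go] <;> simp [splitRec]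
  | cons c rest ih =>
    intro fuel cur acc hf
    match fuel, hf with
    | fuel + 1, hf =>
      rw [PySem.Chars.splitOn.go]
      by_cases hc : c = '\\'
      · subst hc
        have hpre : List.isPrefixOf ['\\'] ('\\' :: rest) = true := by
          simp [List.isPrefixOf]
        simp only [hpre, if_true, List.length_cons, List.length_nil, List.drop_succ_cons,
          List.drop_zero]
        rw [ih fuel [] (cur.reverse :: acc) (by simpa using Nat.lt_of_succ_lt_succ hf)]
        simp [splitRec]
      · have hpre : List.isPrefixOf ['\\'] (c :: rest) = false := by
          simp [List.isPrefixOf]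
          exact fun h => absurd h.symm hc
        simp only [hpre, Bool.false_eq_true, if_false]
        rw [ih fuel (c :: cur) acc (by simpa using Nat.lt_of_succ_lt_succ hf)]
        simp [splitRec, hc]

theorem splitOn_eq (l : List Char) :
    PySem.Chars.splitOn l ['\\'] = (splitRec l).1 :: (splitRec l).2 := by
  unfold PySem.Chars.splitOn
  rw [splitOn_go_spec l (l.length + 1) [] [] (by omega)]
  simp

-- runsGo over strings = runsGoC over their character lists.
def runsGoC : List (List Char) → Int → Int
  | [], _ => 0
  | p :: rest, k =>
    if p = [] ∧ rest ≠ [] then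
      runsGoC rest (k + 1)
    else
      PySem.Int.floordiv k 2 +
        (if PySem.Int.mod k 2 = 1 ∧ p ≠ [] then
          (if PySem.List.pyGet? p 0 = some 'x' then 3 else 1) else 0) +
      runsGoC rest 1

theorem runsGoC_cons (p : List Char) (rest : List (List Char)) (k : Int) :
    runsGoC (p :: rest) k =
      if p = [] ∧ rest ≠ [] then
        runsGoC rest (k + 1)
      else
        PySem.Int.floordiv k 2 +
          (if PySem.Int.mod k 2 = 1 ∧ p ≠ [] then
            (if PySem.List.pyGet? p 0 = some 'x' then 3 else 1) else 0) +
        runsGoC rest 1 := by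
  rw [runsGoC]

theorem runsGo_map (css : List (List Char)) : ∀ k total : Int,
    runsGo (css.map String.ofList) k total = total + runsGoC css k := by
  induction css with
  | nil => intro k total; simp [runsGo, runsGoC]
  | cons p rest ih =>
    intro k total
    have hempty : (String.ofList p = "") ↔ p = [] := by
      constructor
      · intro h
        have := congrArg String.toList h
        simpa using this
      · intro h; subst h; rfl
    have hrest : (rest.map String.ofList ≠ []) ↔ rest ≠ [] := by simp
    have hget : PySem.Str.pyGet? (String.ofList p) 0 = PySem.List.pyGet? p 0 := by
      rw [PySem.Str.pyGet?_eq]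
      simp [PySem.Chars.pyGet?_eq_listPyGet?]
    simp only [List.map_cons, runsGo, runsGoC, hget, ih]
    by_cases hp : p = []
    · subst hp; simp; split_ifs <;> ring
    · simp [hp, hempty]; split_ifs <;> ring

-- Arithmetic facts about Python's // and % on positive k.
theorem floordiv_succ_odd (k : Int) (h : PySem.Int.mod k 2 = 1) :
    PySem.Int.floordiv (k + 1) 2 = PySem.Int.floordiv k 2 + 1 ∧ PySem.Int.mod (k + 1) 2 ≠ 1 := by
  simp only [PySem.Int.floordiv, PySem.Int.mod, Int.fdiv_eq_ediv, Int.fmod_eq_emod] at *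
  omega

theorem floordiv_succ_even (k : Int) (h : PySem.Int.mod k 2 ≠ 1) :
    PySem.Int.floordiv (k + 1) 2 = PySem.Int.floordiv k 2 ∧ PySem.Int.mod (k + 1) 2 = 1 := by
  simp only [PySem.Int.floordiv, PySem.Int.mod, Int.fdiv_eq_ediv, Int.fmod_eq_emod] at *
  omega

-- Main invariant: runsGoC on the split of l, mid-run with k backslashes seen (first conjunct),
-- and at top level after the first piece (second conjunct), computes A's reference counts.
theorem runs_inv (l : List Char) :
    (∀ k : Int, 1 ≤ k →
      runsGoC ((splitRec l).1 :: (splitRec l).2) k =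
        PySem.Int.floordiv k 2 + (if PySem.Int.mod k 2 = 1 then goEsc l else goChar l)) ∧
    runsGoC (splitRec l).2 1 = goChar l := by
  induction l with
  | nil =>
    constructor
    · intro k hk
      simp [splitRec, runsGoC, goEsc, goChar]
    · simp [splitRec, runsGoC, goChar]
  | cons c rest ih =>
    by_cases hc : c = '\\'
    · subst hc
      have hsplit : splitRec ('\\' :: rest) = ([], (splitRec rest).1 :: (splitRec rest).2) := by
        simp [splitRec]
      constructor
      · intro k hk
        rw [hsplit]
        rw [runsGoC_cons, if_pos ⟨rfl, by simp⟩]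
        rw [ih.1 (k + 1) (by omega)]
        rw [goChar_backslash]
        have hesc : goEsc ('\\' :: rest) = 1 + goChar rest := by simp [goEsc]
        by_cases hm : PySem.Int.mod k 2 = 1
        · obtain ⟨hd, hm'⟩ := floordiv_succ_odd k hm
          rw [hd, if_neg hm', if_pos hm, hesc]
          ring
        · obtain ⟨hd, hm'⟩ := floordiv_succ_even k hm
          rw [hd, if_pos hm', if_neg hm]
      · rw [hsplit]
        simp only
        rw [ih.1 1 (by omega)]
        rw [goChar_backslash]
        simp only [PySem.Int.floordiv, PySem.Int.mod]
        norm_num [Int.fdiv, Int.fmod]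
    · have hsplit : splitRec (c :: rest) = (c :: (splitRec rest).1, (splitRec rest).2) := by
        simp [splitRec, hc]
      constructor
      · intro k hk
        rw [hsplit]
        rw [runsGoC_cons, if_neg (by simp)]
        rw [ih.2]
        have hchar : goChar (c :: rest) = goChar rest := by
          conv_lhs => rw [goChar.eq_def]
          simp [hc]
        have hesc : goEsc (c :: rest) = (if c = 'x' then 3 else 1) + goChar rest := by
          simp [goEsc]
        have hget : PySem.List.pyGet? (c :: (splitRec rest).1) (0 : Int) = some c := by
          simp [PySem.List.pyGet?, PySem.List.pyIdx?]
        by_cases hm : PySem.Int.mod k 2 = 1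
        · rw [if_pos (by exact ⟨hm, by simp⟩), if_pos hm, hget, hesc]
          simp only [Option.some.injEq]
          ring
        · rw [if_neg (by intro h; exact hm h.1), if_neg hm, hchar]
          ring
      · rw [hsplit]
        simp only
        rw [ih.2]
        conv_rhs => rw [goChar.eq_def]
        simp [hc]

-- B's port computed on the character list.
theorem unescape_alt_eq (s : String) : unescape_alt s = 2 + goChar s.toList := by
  unfold unescape_alt
  have hsplit : PySem.Str.split? s "\\" =
      some ((PySem.Chars.splitOn s.toList ['\\']).map String.ofList) := by
    unfold PySem.Str.split? PySem.Chars.split?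
    simp
  rw [hsplit]
  simp only [Option.getD_some]
  rw [splitOn_eq]
  simp only [List.map_cons, List.drop_succ_cons, List.drop_zero]
  rw [runsGo_map, (runs_inv s.toList).2]

-- ===== VERDICT (by name: the statement is the Claim_ definition above) =====
theorem unescape_spec : Claim_equal_unescape := by
  intro s _
  show unescape s = unescape_alt s
  rw [unescape_alt_eq]
  unfold unescape
  exact (unescape_fold_inv s.toList).1 2
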